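-- pv_equiv track=rewrite | github.com/World-Ablaze/world-ablaze-beta | tools/ai_will_do_replacer_land.py | has_blank_lines_before_block
-- ===== SOURCE A (Python) =====
-- def has_blank_lines_before_block(content: str, block_start: int) -> bool:
--     """
--     Check if there are excessive blank lines (more than 1) before the ai_will_do block,
--     or if there's whitespace-only content between the previous line and ai_will_do.
--     """
--     # Find the start of the line containing ai_will_do
--     line_start = content.rfind('\n', 0, block_start)
--     if line_start == -1:
--         line_start = 0
--     else:
--         line_start += 1
--
--     # Check if there's only whitespace on this line before ai_will_do
--     line_before_ai = content[line_start:block_start]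
--     if line_before_ai.strip() != '' and 'ai_will_do' not in line_before_ai:
--         # There's other content on this line, that's wrong
--         return True
--
--     # Count consecutive blank lines before this line
--     blank_line_count = 0
--     pos = line_start - 1
--
--     while pos >= 0:
--         # Find start of previous line
--         prev_line_start = content.rfind('\n', 0, pos)
--         if prev_line_start == -1:
--             prev_line_start = 0
--         else:
--             prev_line_start += 1
--
--         line_content = content[prev_line_start:pos + 1].strip()
--
--         if line_content == '':
--             blank_line_count += 1
--             if blank_line_count > 1:
--                 return True
--         else:
--             # Found non-blank line
--             break
--
--         pos = prev_line_start - 1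
--
--     return False
-- ===== SOURCE B (Python) =====
-- def has_blank_lines_before_block(content: str, block_start: int) -> bool:
--     # Same line_start computation and same-line guard as the original.
--     line_start = content.rfind('\n', 0, block_start)
--     line_start = 0 if line_start == -1 else line_start + 1
--
--     line_before_ai = content[line_start:block_start]
--     if line_before_ai.strip() != '' and 'ai_will_do' not in line_before_ai:
--         return True
--
--     # Split the preceding text into whole lines once, then scan them backwards.
--     preceding = content[:line_start].split('\n')[:-1]
--     blanks = 0
--     for line in reversed(preceding):
--         if line.strip() == '':
--             blanks += 1
--             if blanks > 1:
--                 return True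
--         else:
--             break
--     return False
-- ===== Notes on version B (the rewrite author's own statement) =====
-- stated objective: simpler
-- what changed: The backward rfind pointer-walk over the text is replaced by one split('\n') of the preceding prefix into a concrete list of lines (dropping the trailing empty piece) followed by a reverse scan counting blank lines.
import Mathlib
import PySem

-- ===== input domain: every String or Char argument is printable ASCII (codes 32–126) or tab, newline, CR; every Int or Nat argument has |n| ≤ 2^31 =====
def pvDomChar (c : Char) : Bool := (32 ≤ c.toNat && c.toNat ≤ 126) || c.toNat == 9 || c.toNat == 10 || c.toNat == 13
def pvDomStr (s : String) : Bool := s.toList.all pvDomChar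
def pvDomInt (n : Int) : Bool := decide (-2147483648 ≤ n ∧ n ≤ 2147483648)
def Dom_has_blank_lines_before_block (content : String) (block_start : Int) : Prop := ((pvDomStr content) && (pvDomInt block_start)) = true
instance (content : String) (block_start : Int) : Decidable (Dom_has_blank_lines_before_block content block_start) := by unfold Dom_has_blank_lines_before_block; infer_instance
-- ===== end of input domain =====

-- B replaces A's backward rfind pointer-walk by one split of the preceding text into
-- lines plus a reverse scan counting blanks (objective: simpler); return values agree
-- on ALL inputs (no precondition needed).

-- ===== PORT A =====
-- These three lemmas are proof infrastructure the PORT ITSELF needs for termination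
-- of its while-loop (cited by name in `decreasing_by`): s.rfind('\n', 0, e) is < e.
lemma pv_single_prefix (c : Char) (l : List Char) : [c] <+: l ↔ l[0]? = some c := by
  cases l with
  | nil => simp
  | cons a t => simp [List.cons_prefix_iff, eq_comm]

lemma pv_go_eq (p : List Char) (c : Char) (x : Nat) :
    PySem.Chars.rfind.go p [c] x =
      if ∃ j, j ≤ x ∧ p[j]? = some c then ((Nat.findGreatest (fun j => p[j]? = some c) x : Nat) : Int) else -1 := by
  induction x with
  | zero =>
    simp only [PySem.Chars.rfind.go]
    by_cases h : p[0]? = some c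
    · simp [pv_single_prefix, h]
    · simp [pv_single_prefix, h]
  | succ n ih =>
    simp only [PySem.Chars.rfind.go]
    by_cases h : p[n+1]? = some c
    · have hex : ∃ j, j ≤ n+1 ∧ p[j]? = some c := ⟨n+1, le_refl _, h⟩
      simp [pv_single_prefix, List.getElem?_drop, h, hex]
    · have hiff : (∃ j, j ≤ n+1 ∧ p[j]? = some c) ↔ (∃ j, j ≤ n ∧ p[j]? = some c) := by
        constructor
        · rintro ⟨j, hj, hp⟩
          refine ⟨j, ?_, hp⟩
          rcases Nat.lt_or_ge j (n+1) with h'|h'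
          · omega
          · exact absurd (by rwa [show j = n+1 by omega] at hp) h
        · rintro ⟨j, hj, hp⟩; exact ⟨j, by omega, hp⟩
      rw [ih]
      simp [pv_single_prefix, List.getElem?_drop, h, hiff]

-- s.rfind('\n', 0, e) for 0 ≤ e: it is the rfind of the prefix s[:e], and lies in [-1, e).
lemma pv_rfindFrom_zero (cs : List Char) (c : Char) (e : Int) (he : 0 ≤ e) :
    PySem.Chars.rfindFrom cs [c] 0 (some e) = PySem.Chars.rfind (cs.take e.toNat) [c] := by
  simp only [PySem.Chars.rfindFrom]
  by_cases hn : (cs.length : Int) < e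
  · have h1 : cs.take e.toNat = cs := List.take_of_length_le (by omega)
    have h2 : ((cs.length:Int)).toNat = cs.length := by omega
    simp [hn, h2, h1, List.take_of_length_le (le_refl cs.length)]
    split
    · omega
    · simp_all
  · have h3 : ¬ (e < 0) := by omega
    simp [hn, h3]
    exact fun h => h.symm

lemma pv_rfind_bounds (p : List Char) (c : Char) :
    PySem.Chars.rfind p [c] = -1 ∨
      (0 ≤ PySem.Chars.rfind p [c] ∧ (PySem.Chars.rfind p [c]).toNat < p.length ∧
        p[(PySem.Chars.rfind p [c]).toNat]? = some c) := by
  rw [PySem.Chars.rfind, pv_go_eq]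
  split
  · rename_i hex
    obtain ⟨j, hj, hp⟩ := hex
    right
    set r := Nat.findGreatest (fun j => p[j]? = some c) p.length with hr
    have hspec : p[r]? = some c := Nat.findGreatest_spec (P := fun j => p[j]? = some c) hj hp
    have hlt : r < p.length := (List.getElem?_eq_some_iff.mp hspec).1
    exact ⟨by positivity, by simpa using hlt, by simpa using hspec⟩
  · left; rfl

lemma pv_rfindFrom_lt (cs : List Char) (e : Int) (he : 0 ≤ e) :
    -1 ≤ PySem.Chars.rfindFrom cs ['\n'] 0 (some e) ∧
      PySem.Chars.rfindFrom cs ['\n'] 0 (some e) < e := by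
  rw [pv_rfindFrom_zero cs '\n' e he]
  rcases pv_rfind_bounds (cs.take e.toNat) '\n' with h | ⟨h1, h2, h3⟩
  · omega
  · have := List.length_take_le e.toNat cs
    omega

-- the `while pos >= 0` loop of A, on content.toList; count = blank_line_count
def pvLoopA (cs : List Char) (count : Nat) (pos : Int) : Bool :=
  if h : pos < 0 then false
  else
    let r := PySem.Chars.rfindFrom cs ['\n'] 0 (some pos)        -- content.rfind('\n', 0, pos)
    let prev_line_start : Int := if r = -1 then 0 else r + 1
    let line_content := PySem.Chars.strip (PySem.Chars.slice cs (some prev_line_start) (some (pos + 1)))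
    if line_content = [] then
      if count + 1 > 1 then true
      else pvLoopA cs (count + 1) (prev_line_start - 1)
    else false
termination_by (pos + 1).toNat
decreasing_by
  have hb := pv_rfindFrom_lt cs pos (by omega)
  split <;> omega

def has_blank_lines_before_block (content : String) (block_start : Int) : Bool :=
  let cs := content.toList
  let r0 := PySem.Chars.rfindFrom cs ['\n'] 0 (some block_start)  -- content.rfind('\n', 0, block_start)
  let line_start : Int := if r0 = -1 then 0 else r0 + 1
  let line_before_ai := PySem.Chars.slice cs (some line_start) (some block_start)
  if PySem.Chars.strip line_before_ai ≠ [] ∧ ¬ PySem.Chars.isIn ['a','i','_','w','i','l','l','_','d','o'] line_before_ai then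
    true
  else
    pvLoopA cs 0 (line_start - 1)

-- ===== PORT B =====
-- the `for line in reversed(preceding)` loop of B; blanks = blank counter
def pvLoopB (lines : List (List Char)) (blanks : Nat) : Bool :=
  match lines with
  | [] => false
  | line :: rest =>
    if PySem.Chars.strip line = [] then
      if blanks + 1 > 1 then true
      else pvLoopB rest (blanks + 1)
    else false

def has_blank_lines_before_block_alt (content : String) (block_start : Int) : Bool :=
  let cs := content.toList
  let r0 := PySem.Chars.rfindFrom cs ['\n'] 0 (some block_start)
  let line_start : Int := if r0 = -1 then 0 else r0 + 1
  let line_before_ai := PySem.Chars.slice cs (some line_start) (some block_start)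
  if PySem.Chars.strip line_before_ai ≠ [] ∧ ¬ PySem.Chars.isIn ['a','i','_','w','i','l','l','_','d','o'] line_before_ai then
    true
  else
    -- preceding = content[:line_start].split('\n')[:-1]
    let preceding := PySem.List.slice
      ((PySem.Chars.split? (PySem.Chars.slice cs none (some line_start)) ['\n']).getD [])
      none (some (-1))
    pvLoopB preceding.reverse 0

-- ===== PRECONDITION & SPEC =====
def Spec_has_blank_lines_before_block (content : String) (block_start : Int) (out : Bool) : Prop := out = has_blank_lines_before_block_alt content block_start
instance (content : String) (block_start : Int) (out : Bool) : Decidable (Spec_has_blank_lines_before_block content block_start out) := by unfold Spec_has_blank_lines_before_block; infer_instance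

-- ===== CLAIM (what is proved, stated in full; the proofs are below) =====
def Claim_equal_has_blank_lines_before_block : Prop := ∀ (content : String) (block_start : Int), Dom_has_blank_lines_before_block content block_start → Spec_has_blank_lines_before_block content block_start (has_blank_lines_before_block content block_start)

-- ===== LEMMAS AND PROOFS =====

-- reference splitter: Python s.split('\n') as a structural recursion
def pvNsplit : List Char → List (List Char)
  | [] => [[]]
  | c :: t => if c = '\n' then [] :: pvNsplit t else (pvNsplit t).modifyHead (c :: ·)

lemma pvNsplit_ne_nil (l : List Char) : pvNsplit l ≠ [] := by
  induction l with
  | nil => simp [pvNsplit]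
  | cons c t ih =>
    simp only [pvNsplit]
    split
    · simp
    · rcases h : pvNsplit t with _ | ⟨hd, tl⟩
      · exact absurd h ih
      · simp

lemma pv_splitOn_go (fuel : Nat) : ∀ (l cur : List Char) (acc : List (List Char)),
    l.length ≤ fuel →
    PySem.Chars.splitOn.go ['\n'] fuel l cur acc =
      acc.reverse ++ (pvNsplit l).modifyHead (cur.reverse ++ ·) := by
  induction fuel with
  | zero =>
    intro l cur acc h
    have : l = [] := List.length_eq_zero_iff.mp (by omega)
    subst this
    simp [PySem.Chars.splitOn.go, pvNsplit]
  | succ f ih =>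
    intro l cur acc h
    cases l with
    | nil => simp [PySem.Chars.splitOn.go, pvNsplit]
    | cons c rest =>
      simp only [PySem.Chars.splitOn.go]
      by_cases hc : c = '\n'
      · subst hc
        have hpre : List.isPrefixOf ['\n'] ('\n' :: rest) = true := by
          simp
        rw [if_pos hpre]
        rw [ih _ _ _ (by simp at h ⊢; omega)]
        simp only [pvNsplit]
        rcases hsp : pvNsplit rest with _ | ⟨hd, tl⟩
        · exact absurd hsp (pvNsplit_ne_nil rest)
        · simp [hsp]
      · have hpre : ¬ List.isPrefixOf ['\n'] (c :: rest) = true := by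
          simp
          exact fun h' => hc h'.symm
        rw [if_neg hpre]
        rw [ih _ _ _ (by simp at h ⊢; omega)]
        simp only [pvNsplit, if_neg hc]
        rcases hsp : pvNsplit rest with _ | ⟨hd, tl⟩
        · exact absurd hsp (pvNsplit_ne_nil rest)
        · simp [List.modifyHead]

lemma pv_splitOn_eq (s : List Char) : PySem.Chars.splitOn s ['\n'] = pvNsplit s := by
  rw [PySem.Chars.splitOn, pv_splitOn_go _ _ _ _ (by omega)]
  rcases hsp : pvNsplit s with _ | ⟨hd, tl⟩
  · exact absurd hsp (pvNsplit_ne_nil s)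
  · simp

lemma pv_nsplit_first (m y : List Char) (hm : '\n' ∉ m) :
    pvNsplit (m ++ '\n' :: y) = m :: pvNsplit y := by
  induction m with
  | nil => simp [pvNsplit]
  | cons c m' ih =>
    have hc : ¬ (c = '\n') := by intro h; exact hm (by simp [h])
    have hm' : '\n' ∉ m' := fun h => hm (by simp [h])
    simp only [List.cons_append, pvNsplit, if_neg hc, ih hm']
    simp [List.modifyHead]

lemma pvNsplit_len (l : List Char) (h : '\n' ∈ l) : 2 ≤ (pvNsplit l).length := by
  induction l with
  | nil => simp at h
  | cons c t ih =>
    simp only [pvNsplit]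
    by_cases hc : c = '\n'
    · rw [if_pos hc]
      have := pvNsplit_ne_nil t
      rcases hsp : pvNsplit t with _ | ⟨hd, tl⟩
      · exact absurd hsp this
      · simp
    · rw [if_neg hc]
      have ht : '\n' ∈ t := (List.mem_cons.mp h).resolve_left (fun h' => hc h'.symm)
      have := ih ht
      rcases hsp : pvNsplit t with _ | ⟨hd, tl⟩
      · exact absurd hsp (pvNsplit_ne_nil t)
      · rw [hsp] at this; simpa using this

lemma pv_peel (a m : List Char) (hm : '\n' ∉ m)
    (ha : a = [] ∨ ∃ a', a = a' ++ ['\n']) :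
    pvNsplit (a ++ (m ++ ['\n'])) = (pvNsplit a).dropLast ++ [m, []] := by
  induction a with
  | nil =>
    have : pvNsplit (m ++ '\n' :: []) = m :: pvNsplit [] := pv_nsplit_first m [] hm
    simpa [pvNsplit] using this
  | cons c rest ih =>
    rcases ha with h | ⟨a', ha'⟩
    · exact absurd h (by simp)
    · by_cases hc : c = '\n'
      · subst hc
        have hrest : rest = [] ∨ ∃ r', rest = r' ++ ['\n'] := by
          cases a' with
          | nil => left; simp at ha'; exact ha'
          | cons b bs =>
            right
            refine ⟨bs, ?_⟩
            simp at ha'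
            exact ha'.2
        have := ih hrest
        simp only [List.cons_append, pvNsplit, this]
        have h2 := pvNsplit_ne_nil rest
        rcases hsp : pvNsplit rest with _ | ⟨hd, tl⟩
        · exact absurd hsp h2
        · simp [hsp] at this ⊢
      · -- c ≠ '\n' : then a' ≠ [] pattern; rest still ends with '\n'
        have hane : a' ≠ [] := by
          intro h; subst h; simp at ha'; exact hc (ha'.1)
        have hrest : ∃ r', rest = r' ++ ['\n'] := by
          cases a' with
          | nil => exact absurd rfl hane
          | cons b bs => refine ⟨bs, ?_⟩; simp at ha'; exact ha'.2
        have := ih (Or.inr hrest)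
        have hmem : '\n' ∈ rest := by obtain ⟨r', hr⟩ := hrest; simp [hr]
        have hlen := pvNsplit_len rest hmem
        simp only [List.cons_append, pvNsplit, if_neg hc, this]
        rcases hsp : pvNsplit rest with _ | ⟨hd, tl⟩
        · exact absurd hsp (pvNsplit_ne_nil rest)
        · have htl : tl ≠ [] := by rw [hsp] at hlen; intro h; simp [h] at hlen
          simp [List.modifyHead, List.dropLast_cons_of_ne_nil htl]

lemma pv_rstrip_append_nl (x : List Char) :
    PySem.Chars.rstrip (x ++ ['\n']) = PySem.Chars.rstrip x := by
  simp [PySem.Chars.rstrip, List.reverse_append, List.dropWhile]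
  norm_num [show PySem.Chars.isspace '\n' = true from by decide]

lemma pv_strip_append_nl (m : List Char) :
    PySem.Chars.strip (m ++ ['\n']) = PySem.Chars.strip m := by
  simp only [PySem.Chars.strip, PySem.Chars.lstrip]
  rw [List.dropWhile_append]
  split
  · rename_i h
    simp [List.dropWhile, show PySem.Chars.isspace '\n' = true from by decide]
    simp at h
    rw [List.dropWhile_eq_nil_iff.mpr h]
  · exact pv_rstrip_append_nl _

-- maximality of rfind: no later occurrence of c
lemma pv_rfind_max (p : List Char) (c : Char) (k : Nat)
    (h1 : PySem.Chars.rfind p [c] < (k : Int)) : p[k]? ≠ some c := by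
  rw [PySem.Chars.rfind, pv_go_eq] at h1
  intro hk
  have hklen : k < p.length := (List.getElem?_eq_some_iff.mp hk).1
  split at h1
  · have hgr : Nat.findGreatest (fun j => p[j]? = some c) p.length < k := by
      exact_mod_cast h1
    exact (Nat.findGreatest_is_greatest hgr (by omega)) hk
  · rename_i hex
    exact hex ⟨k, by omega, hk⟩

-- the heart: A's while-loop equals B's reverse scan over split lines
lemma pv_main (cs : List Char) (ls : Nat) (hle : ls ≤ cs.length)
    (hinv : ls = 0 ∨ cs[ls - 1]? = some '\n') (count : Nat) :
    pvLoopA cs count ((ls : Int) - 1) =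
      pvLoopB (((pvNsplit (cs.take ls)).dropLast).reverse) count := by
  induction ls using Nat.strong_induction_on generalizing count with
  | _ ls ih =>
  by_cases hls : ls = 0
  · subst hls
    rw [pvLoopA.eq_def]
    norm_num [pvNsplit, pvLoopB]
  · -- ls ≥ 1
    have hnl : cs[ls - 1]? = some '\n' := hinv.resolve_left hls
    have hpos : ¬ ((ls : Int) - 1 < 0) := by omega
    rw [pvLoopA.eq_def, dif_neg hpos]
    -- name the rfind result on the prefix p = cs[:ls-1]
    have hls1 : ((ls : Int) - 1) = ((ls - 1 : Nat) : Int) := by omega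
    have hrw : PySem.Chars.rfindFrom cs ['\n'] 0 (some ((ls : Int) - 1))
        = PySem.Chars.rfind (cs.take (ls - 1)) ['\n'] := by
      rw [pv_rfindFrom_zero cs '\n' _ (by omega)]
      have : ((ls : Int) - 1).toNat = ls - 1 := by omega
      rw [this]
    set p := cs.take (ls - 1) with hp
    have hplen : p.length = ls - 1 := by simp [hp]; omega
    have htake : cs.take ls = p ++ ['\n'] := by
      have : ls = (ls - 1) + 1 := by omega
      rw [this, List.take_add_one, hnl]
      rfl
    have hslice : PySem.Chars.slice cs (some ((ls : Int) - 1 + 1)) (some ((ls : Int) - 1 + 1)) = [] := by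
      simp [PySem.Chars.slice_eq_listSlice, PySem.List.slice]
    rcases pv_rfind_bounds p '\n' with hr | ⟨hr0, hrlt, hrget⟩
    · -- no '\n' in cs[:ls-1]: single line before, prev_line_start = 0
      have hnomem : '\n' ∉ p := by
        intro hmem
        obtain ⟨k, hk, hget⟩ := List.getElem_of_mem hmem
        exact pv_rfind_max p '\n' k (by rw [hr]; omega) (by simp [List.getElem?_eq_some_iff]; exact ⟨hk, hget⟩)
      rw [hrw, hr]
      simp only [reduceIte]
      -- line_content = strip (cs[0:ls]) = strip p
      have hsl : PySem.Chars.slice cs (some 0) (some ((ls : Int) - 1 + 1)) = p ++ ['\n'] := by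
        have h1 : ((ls : Int) - 1 + 1) = ((ls : Nat) : Int) := by omega
        rw [h1]
        simp [PySem.Chars.slice_eq_listSlice, PySem.List.slice_zero_start, PySem.List.slice_to_natCast, htake]
      rw [hsl, pv_strip_append_nl]
      -- split result: [p]
      have hsplit : ((pvNsplit (cs.take ls)).dropLast).reverse = [p] := by
        rw [htake, show p ++ ['\n'] = [] ++ (p ++ ['\n']) from rfl,
          pv_peel [] p hnomem (Or.inl rfl)]
        simp [pvNsplit]
      rw [hsplit]
      by_cases hstr : PySem.Chars.strip p = []
      · simp only [pvLoopB, hstr]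
        by_cases hcnt : count + 1 > 1
        · simp [hcnt]
        · simp only [if_neg hcnt]
          rw [pvLoopA.eq_def]
          norm_num [pvLoopB]
      · simp [pvLoopB, hstr]
    · -- a last '\n' exists in cs[:ls-1] at index rN
      set rN := (PySem.Chars.rfind p ['\n']).toNat with hrN
      have hrNlt : rN < ls - 1 := hplen ▸ hrlt
      have hcsrN : cs[rN]? = some '\n' := by
        have h2 := List.getElem?_take_of_lt (l := cs) hrNlt
        rw [← hp] at h2
        rw [← h2]
        exact hrget
      simp only [hrw, if_neg (show ¬ (PySem.Chars.rfind p ['\n'] = -1) by omega)]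
      -- the current line: cs[rN+1 : ls]
      have hcast1 : PySem.Chars.rfind p ['\n'] + 1 = ((rN + 1 : Nat) : Int) := by omega
      have hcast2 : ((ls : Int) - 1 + 1) = ((ls : Nat) : Int) := by omega
      rw [hcast1, hcast2]
      set m := (cs.drop (rN + 1)).take (ls - 1 - (rN + 1)) with hm
      have hmp : m = p.drop (rN + 1) := by
        rw [hp, List.drop_take]
      have hline : PySem.Chars.slice cs (some ((rN + 1 : Nat) : Int)) (some ((ls : Nat) : Int))
          = m ++ ['\n'] := by
        simp only [PySem.Chars.slice_eq_listSlice, PySem.List.slice_natCast]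
        have h1 : ls - (rN + 1) = (ls - 1 - (rN + 1)) + 1 := by omega
        rw [h1, List.take_add_one]
        have h2 : (cs.drop (rN + 1))[ls - 1 - (rN + 1)]? = some '\n' := by
          rw [List.getElem?_drop]
          have : rN + 1 + (ls - 1 - (rN + 1)) = ls - 1 := by omega
          rw [this, hnl]
        rw [h2, hm]
        rfl
      have hnomem_m : '\n' ∉ m := by
        intro hmem
        rw [hmp] at hmem
        obtain ⟨i, hi, hget⟩ := List.getElem_of_mem hmem
        have : p[rN + 1 + i]? = some '\n' := by
          rw [← List.getElem?_drop]
          simp only [List.getElem?_eq_some_iff]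
          exact ⟨hi, hget⟩
        exact pv_rfind_max p '\n' (rN + 1 + i) (by omega) this
      have ha_end : cs.take (rN + 1) = cs.take rN ++ ['\n'] := by
        rw [List.take_add_one, hcsrN]
        rfl
      have hdecomp : cs.take ls = cs.take (rN + 1) ++ (m ++ ['\n']) := by
        have h1 : cs.take (rN + 1) = p.take (rN + 1) := by
          rw [hp, List.take_take]
          congr 1
          omega
        rw [h1, hmp, ← List.append_assoc, List.take_append_drop, htake]
      have hsplit : ((pvNsplit (cs.take ls)).dropLast).reverse
          = m :: ((pvNsplit (cs.take (rN + 1))).dropLast).reverse := by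
        rw [hdecomp, pv_peel _ m hnomem_m (Or.inr ⟨cs.take rN, ha_end⟩)]
        simp
      rw [hline, pv_strip_append_nl, hsplit]
      by_cases hstr : PySem.Chars.strip m = []
      · simp only [pvLoopB, hstr, reduceIte]
        by_cases hcnt : count + 1 > 1
        · simp [hcnt]
        · simp only [if_neg hcnt]
          have hrec := ih (rN + 1) (by omega) (by omega) (Or.inr (by simpa using hcsrN)) (count + 1)
          have : ((rN + 1 : Nat) : Int) - 1 = ((rN + 1 : Nat) : Int) - 1 := rfl
          exact hrec
      · simp [pvLoopB, hstr]

-- any s.rfind('\n', 0, e) is the rfind of some prefix of s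
lemma pv_rfindFrom_take (cs : List Char) (c : Char) (e : Int) :
    ∃ k : Nat, PySem.Chars.rfindFrom cs [c] 0 (some e) = PySem.Chars.rfind (cs.take k) [c] := by
  by_cases he : 0 ≤ e
  · exact ⟨e.toNat, pv_rfindFrom_zero cs c e he⟩
  · refine ⟨(e + cs.length).toNat, ?_⟩
    simp only [PySem.Chars.rfindFrom]
    have h1 : ¬ ((cs.length : Int) < e) := by omega
    have h2 : e < 0 := by omega
    simp [h1, h2]
    by_cases h3 : e + (cs.length : Int) < 0
    · simp [h3, show ((e + (cs.length : Int)).toNat = 0) from by omega]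
      exact fun h => h.symm
    · simp [h3]
      exact fun h => h.symm

-- line_start - 1 always sits at a '\n' (or is -1): the invariant pv_main needs
lemma pv_rfindFrom_inv (cs : List Char) (e : Int) :
    PySem.Chars.rfindFrom cs ['\n'] 0 (some e) = -1 ∨
      (0 ≤ PySem.Chars.rfindFrom cs ['\n'] 0 (some e) ∧
        (PySem.Chars.rfindFrom cs ['\n'] 0 (some e)).toNat < cs.length ∧
        cs[(PySem.Chars.rfindFrom cs ['\n'] 0 (some e)).toNat]? = some '\n') := by
  obtain ⟨k, hk⟩ := pv_rfindFrom_take cs '\n' e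
  rw [hk]
  rcases pv_rfind_bounds (cs.take k) '\n' with h | ⟨h1, h2, h3⟩
  · exact Or.inl h
  · right
    have hlen : (cs.take k).length = min k cs.length := by simp
    refine ⟨h1, by omega, ?_⟩
    rw [← List.getElem?_take_of_lt (l := cs) (show (PySem.Chars.rfind (cs.take k) ['\n']).toNat < k by omega)]
    exact h3

-- ===== VERDICT (by name: the statement is the Claim_ definition above) =====
theorem has_blank_lines_before_block_spec : Claim_equal_has_blank_lines_before_block := by
  intro content block_start _
  unfold Spec_has_blank_lines_before_block
  unfold has_blank_lines_before_block has_blank_lines_before_block_alt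
  dsimp only
  have hinv0 := pv_rfindFrom_inv content.toList block_start
  generalize hr0 : PySem.Chars.rfindFrom content.toList ['\n'] 0 (some block_start) = r0 at hinv0 ⊢
  set cs := content.toList with hcs
  set ls : Int := if r0 = -1 then 0 else r0 + 1 with hls
  split_ifs with hg
  · rfl
  · have h0ls : 0 ≤ ls := by
      rcases hinv0 with h | ⟨h1, h2, h3⟩
      · rw [hls, if_pos h]
      · rw [hls, if_neg (by omega)]; omega
    have hle : ls.toNat ≤ cs.length := by
      rcases hinv0 with h | ⟨h1, h2, h3⟩
      · rw [hls, if_pos h]; simp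
      · rw [hls, if_neg (by omega)]; omega
    have hinv : ls.toNat = 0 ∨ cs[ls.toNat - 1]? = some '\n' := by
      rcases hinv0 with h | ⟨h1, h2, h3⟩
      · left; rw [hls, if_pos h]; rfl
      · right
        rw [hls, if_neg (by omega)]
        have : (r0 + 1).toNat - 1 = r0.toNat := by omega
        rw [this]
        exact h3
    have hcast : ls = ((ls.toNat : Nat) : Int) := by omega
    have hpre : PySem.Chars.slice cs none (some ls) = cs.take ls.toNat := by
      simp [PySem.Chars.slice_eq_listSlice, PySem.List.slice_to cs h0ls]
    have hsplit : PySem.Chars.split? (PySem.Chars.slice cs none (some ls)) ['\n']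
        = some (pvNsplit (cs.take ls.toNat)) := by
      rw [hpre]
      simp [PySem.Chars.split?, pv_splitOn_eq]
    rw [hsplit]
    simp only [Option.getD_some, PySem.List.slice_to_neg_one]
    rw [hcast]
    exact pv_main cs ls.toNat hle hinv 0
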